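-- pv_equiv track=rewrite | github.com/quocthai912/CS112-Design-And-Analysis-Of-Algorithms | Brute Force/Python/Consonant.py | consonant
-- ===== SOURCE A (Python) =====
-- def kiem_tra_nguyen_am(c):
--     """
--     Hàm được dùng để kiểm tra một kí tự có phải là nguyên âm hay không
--     Args:
--        c (char): Kí tự c (s[i]) cần kiểm tra
--     Returns:
--        True nếu c là nguyên âm và False nếu c không phải là nguyên âm
--     """
--     return (
--         c == "a" or c == "e" or c == "o" or c == "u" or c == "i" or c == "w" or c == "y"
--     )
--
-- def consonant(s: str) -> str:
--     """
--     Hàm chính được dùng để giải quyết bài toán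
--     Args:
--        s (str): Xâu kí tự s cần biến đổi
--     Returns:
--        result (str): Xâu kí tự đã được biến đổi sao cho đối tính phụ âm là lớn nhất
--     """
--     # Mảng lưu index của các phụ âm
--     # index ở đây chính là vị trí xuất hiện đầu tiên của phụ âm trong xâu
--     # index này được dùng để tính bit của phụ âm tại xâu đó
--     index_phu_am = [-1] * 256
--     index = 0
--     for i in range(len(s)):
--         if kiem_tra_nguyen_am(s[i]) == False and index_phu_am[ord(s[i])] == -1:
--             index_phu_am[ord(s[i])] = index
--             index += 1
--     # Tổng số xâu có thể được sinh ra từ số lượng phụ âm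
--     total_masks = 2**index
--     # Mảng hai chiều được dùng để lưu tần suất các cặp phụ âm liên tiếp nhau
--     freq_tuple_phu_am = []
--     for i in range(19):
--         rows = []
--         for j in range(19):
--             rows.append(0)
--         freq_tuple_phu_am.append(rows)
--     # Tính tần suất các cặp phụ âm
--     for i in range(len(s) - 1):
--         if kiem_tra_nguyen_am(s[i]) == False and kiem_tra_nguyen_am(s[i + 1]) == False:
--             u = index_phu_am[ord(s[i])]
--             v = index_phu_am[ord(s[i + 1])]
--             freq_tuple_phu_am[u][v] += 1
--     # Vòng lặp chính duyệt mask
--     # Lưu ý là mask chỉ chứa các bit 0, 1 tương ứng với các phụ âm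
--     # ví dụ "abc" có 2 phụ âm thì mask là 00, 01, 10, 11
--     max_mask = 0
--     max_doi_tinh_phu_am = -1
--     for mask in range(total_masks):
--         doi_tinh_phu_am = 0
--         for i in range(19):
--             for j in range(19):
--                 bit_ki_tu_thu_nhat = (mask >> i) & 1
--                 bit_ki_tu_thu_hai = (mask >> j) & 1
--                 # Nếu một kí tự là hoa, 1 kí tự là thường tại Mask đó
--                 if bit_ki_tu_thu_nhat != bit_ki_tu_thu_hai:
--                     doi_tinh_phu_am += freq_tuple_phu_am[i][j]
--         if doi_tinh_phu_am > max_doi_tinh_phu_am: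
--             max_doi_tinh_phu_am = doi_tinh_phu_am
--             max_mask = mask
--     # Tính chuỗi kết quả từ Mask có đối tính phụ âm lớn nhất
--     result = list(s)
--     for i in range(len(result)):
--         if kiem_tra_nguyen_am(result[i]) == False:
--             bit_ki_tu = (max_mask >> index_phu_am[ord(result[i])]) & 1
--             if bit_ki_tu == 1:
--                 result[i] = result[i].upper()
--     return "".join(result)
-- ===== SOURCE B (Python) =====
-- def consonant(s: str) -> str:
--     vowels = "aeouiwy"
--     # first-appearance index of each distinct non-vowel character
--     idx = {}
--     for c in s:
--         if c not in vowels and c not in idx: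
--             idx[c] = len(idx)
--     k = len(idx)
--     # symmetric pair weights: g[u][v] = (# adjacent pairs (u,v)) + (# adjacent pairs (v,u))
--     g = [[0] * k for _ in range(k)]
--     for c1, c2 in zip(s, s[1:]):
--         if c1 not in vowels and c2 not in vowels:
--             u = idx[c1]
--             v = idx[c2]
--             g[u][v] += 1
--             g[v][u] += 1
--     # S[b] = total weight of b against everything else
--     S = [sum(g[b]) - g[b][b] for b in range(k)]
--     # DP over masks: score[m] = sum of g[i][j] over i in m, j not in m;
--     # score[m] = score[m without highest bit b] + S[b] - 2 * (weight of b against m's other bits)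
--     score = [0] * (2 ** k)
--     best_mask = 0
--     best = 0
--     for mask in range(1, 2 ** k):
--         b = mask.bit_length() - 1
--         m2 = mask - (1 << b)
--         cross = 0
--         for j in range(k):
--             if (m2 >> j) & 1:
--                 cross += g[b][j]
--         sc = score[m2] + S[b] - 2 * cross
--         score[mask] = sc
--         if sc > best:
--             best = sc
--             best_mask = mask
--     return "".join(
--         c.upper() if c in idx and (best_mask >> idx[c]) & 1 else c for c in s
--     )
-- ===== Notes on version B (the rewrite author's own statement) =====
-- stated objective: faster
-- what changed: Replaces A's per-mask 19x19 double scan with an incremental DP: each mask's alternation score is computed in O(k) from the score of the mask with its highest bit removed, via a symmetric pair-weight matrix and per-consonant row sums.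
import Mathlib
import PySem

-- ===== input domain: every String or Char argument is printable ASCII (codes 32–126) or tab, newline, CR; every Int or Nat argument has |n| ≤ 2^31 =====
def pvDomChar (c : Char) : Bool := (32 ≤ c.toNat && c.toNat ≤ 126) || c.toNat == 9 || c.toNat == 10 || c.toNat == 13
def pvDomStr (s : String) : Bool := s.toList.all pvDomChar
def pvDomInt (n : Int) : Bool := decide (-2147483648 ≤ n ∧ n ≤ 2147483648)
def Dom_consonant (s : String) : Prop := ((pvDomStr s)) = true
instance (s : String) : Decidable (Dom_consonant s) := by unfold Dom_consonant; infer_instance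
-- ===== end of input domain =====

-- B replaces A's per-mask 19×19 double scan with a DP computing each mask's score from the
-- score of the mask without its highest bit; equality of return values is proved on Pre_.

-- ===== PORT A =====
def kiemTraNguyenAm (c : Char) : Bool :=
  c == 'a' || c == 'e' || c == 'o' || c == 'u' || c == 'i' || c == 'w' || c == 'y'

-- x[u][v] += 1 on a list-of-lists (total pySetD/pyGetD; in range whenever Python does not raise)
def matBump (m : List (List Int)) (u v : Int) : List (List Int) :=
  PySem.List.pySetD m u
    (PySem.List.pySetD (PySem.List.pyGetD m u []) v
      (PySem.List.pyGetD (PySem.List.pyGetD m u []) v 0 + 1))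

-- body of the first loop: assign first-occurrence indices to non-vowels
def aStep : (List Int × Int) → Char → (List Int × Int) := fun st c =>
  if kiemTraNguyenAm c == false && PySem.List.pyGetD st.1 (c.toNat : Int) (-1) == -1 then
    (PySem.List.pySetD st.1 (c.toNat : Int) st.2, st.2 + 1)
  else st

-- body of the pair-frequency loop (for i in range(len(s)-1))
def aPairStep (arr : List Int) : List (List Int) → (Char × Char) → List (List Int) :=
  fun freq p =>
    if kiemTraNguyenAm p.1 == false && kiemTraNguyenAm p.2 == false then
      matBump freq (PySem.List.pyGetD arr (p.1.toNat : Int) (-1))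
        (PySem.List.pyGetD arr (p.2.toNat : Int) (-1))
    else freq

-- doi_tinh_phu_am of one mask: the 19×19 double scan
def aScore (freq : List (List Int)) (mask : Int) : Int :=
  (PySem.List.pyRange 0 19 1).foldl (fun acc i =>
    (PySem.List.pyRange 0 19 1).foldl (fun acc j =>
      let bit1 := PySem.Int.band (mask >>> i.toNat) 1
      let bit2 := PySem.Int.band (mask >>> j.toNat) 1
      if bit1 != bit2 then
        acc + PySem.List.pyGetD (PySem.List.pyGetD freq i []) j 0
      else acc) acc) 0

-- body of the main mask loop
def aMaskStep (freq : List (List Int)) : (Int × Int) → Int → (Int × Int) := fun st mask =>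
  let doiTinh := aScore freq mask
  if doiTinh > st.2 then (mask, doiTinh) else st

def consonant (s : String) : String :=
  -- index_phu_am = [-1]*256 and the running index
  let st := s.toList.foldl aStep (List.replicate 256 (-1 : Int), 0)
  let arr := st.1
  let index := st.2
  -- total_masks = 2**index  (index ≥ 0 always)
  let totalMasks : Int := 2 ^ index.toNat
  -- 19×19 zero matrix built by the two append loops
  let freq0 : List (List Int) := List.replicate 19 (List.replicate 19 (0 : Int))
  -- for i in range(len(s)-1): the pairs s[i], s[i+1]
  let freq := (s.toList.zip s.toList.tail).foldl (aPairStep arr) freq0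
  -- main mask loop
  let res := (PySem.List.pyRange 0 totalMasks 1).foldl (aMaskStep freq) (0, -1)
  let maxMask := res.1
  -- result string
  String.ofList (s.toList.map (fun c =>
    if kiemTraNguyenAm c == false then
      if PySem.Int.band (maxMask >>> (PySem.List.pyGetD arr (c.toNat : Int) (-1)).toNat) 1 == 1 then
        PySem.Chars.upperChar c
      else c
    else c))

-- ===== PORT B =====
def inVowels (c : Char) : Bool := "aeouiwy".toList.contains c   -- `c in vowels`

-- body of the idx-building loop
def bStep : PySem.Dict Char Int → Char → PySem.Dict Char Int := fun d c =>
  if !(inVowels c) && !(d.contains c) then d.insert c (d.size : Int) else d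

-- body of the symmetric pair-weight loop over zip(s, s[1:])
def bPairStep (d : PySem.Dict Char Int) : List (List Int) → (Char × Char) → List (List Int) :=
  fun g p =>
    if !(inVowels p.1) && !(inVowels p.2) then
      matBump (matBump g (d.getD p.1 0) (d.getD p.2 0)) (d.getD p.2 0) (d.getD p.1 0)
    else g

-- body of the DP mask loop
def bMaskStep (k : Nat) (g : List (List Int)) (srow : List Int) :
    (List Int × Int × Int) → Int → (List Int × Int × Int) := fun st mask =>
  let score := st.1
  let b : Int := (PySem.Int.bitLength mask : Int) - 1   -- highest set bit; b ≥ 0 since mask ≥ 1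
  let m2 : Int := mask - (1 <<< b.toNat)
  let cross := (PySem.List.pyRange 0 (k : Int) 1).foldl (fun acc j =>
    if PySem.Int.band (m2 >>> j.toNat) 1 == 1 then
      acc + PySem.List.pyGetD (PySem.List.pyGetD g b []) j 0
    else acc) 0
  let sc := PySem.List.pyGetD score m2 0 + PySem.List.pyGetD srow b 0 - 2 * cross
  let score' := PySem.List.pySetD score mask sc
  if sc > st.2.1 then (score', sc, mask) else (score', st.2.1, st.2.2)

def consonant_alt (s : String) : String :=
  -- idx: dict char -> first-appearance index among distinct non-vowels
  let d := s.toList.foldl bStep PySem.Dict.empty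
  let k : Nat := d.size
  -- g = [[0]*k for _ in range(k)]; symmetric pair weights from zip(s, s[1:])
  let g := (s.toList.zip s.toList.tail).foldl (bPairStep d)
    (List.replicate k (List.replicate k (0 : Int)))
  -- S[b] = sum(g[b]) - g[b][b]
  let srow : List Int := (PySem.List.pyRange 0 (k : Int) 1).map (fun b =>
    (PySem.List.pyGetD g b []).sum - PySem.List.pyGetD (PySem.List.pyGetD g b []) b 0)
  -- DP over masks ascending; score[m] = alternation value of mask m
  let res := (PySem.List.pyRange 1 ((2 : Int) ^ k) 1).foldl (bMaskStep k g srow)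
    (List.replicate (2 ^ k) (0 : Int), 0, 0)
  let bestMask := res.2.2
  String.ofList (s.toList.map (fun c =>
    if d.contains c && PySem.Int.band (bestMask >>> (d.getD c 0).toNat) 1 == 1 then
      PySem.Chars.upperChar c
    else c))

-- ===== PRECONDITION & SPEC =====
def pvConsCh (c : Char) : Bool := !(['a', 'e', 'o', 'u', 'i', 'w', 'y'].contains c)

-- the distinct non-vowel characters of l in first-occurrence order
def pvFirsts (l : List Char) : List Char :=
  l.foldl (fun D c => if pvConsCh c && !(D.contains c) then D ++ [c] else D) []

-- Pre_ excludes exactly the inputs on which A raises IndexError: strings with an adjacent pair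
-- of non-vowel characters one of which is beyond the first 19 distinct non-vowels (A's
-- frequency table is hard-coded 19×19, so it indexes out of range on exactly those pairs).
def Pre_consonant (s : String) : Prop :=
  ∀ p ∈ s.toList.zip s.toList.tail, (pvConsCh p.1 && pvConsCh p.2) = true →
    (pvFirsts s.toList).idxOf p.1 < 19 ∧ (pvFirsts s.toList).idxOf p.2 < 19
instance (s : String) : Decidable (Pre_consonant s) := by unfold Pre_consonant; infer_instance

def pvWitness_consonant : String := "czbcz tqb"

def Spec_consonant (s : String) (out : String) : Prop := out = consonant_alt s
instance (s : String) (out : String) : Decidable (Spec_consonant s out) := by unfold Spec_consonant; infer_instance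

-- ===== CLAIM (what is proved, stated in full; the proofs are below) =====
def Claim_equal_consonant : Prop := ∀ (s : String), Dom_consonant s → Pre_consonant s → Spec_consonant s (consonant s)

-- ===== LEMMAS AND PROOFS =====

-- ---- tiny char facts ----
lemma inVowels_eq (c : Char) : inVowels c = kiemTraNguyenAm c := by
  show ("aeouiwy".toList.contains c) = _
  have h : "aeouiwy".toList = ['a','e','o','u','i','w','y'] := rfl
  rw [h]
  simp only [List.contains_cons, List.contains_nil, Bool.or_false, Bool.or_assoc,
    kiemTraNguyenAm]

lemma pvConsCh_eq (c : Char) : pvConsCh c = !(kiemTraNguyenAm c) := by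
  simp only [pvConsCh, List.contains_cons, List.contains_nil, Bool.or_false, Bool.or_assoc,
    kiemTraNguyenAm]

lemma char_toNat_inj {c c' : Char} (h : c.toNat = c'.toNat) : c = c' :=
  Char.ext (UInt32.toNat_inj.mp h)

-- ---- the distinct-consonant list (first-occurrence order) ----
def pvDStep (D : List Char) (c : Char) : List Char :=
  if kiemTraNguyenAm c == false && !(D.contains c) then D ++ [c] else D

def pvD (l : List Char) : List Char := l.foldl pvDStep []

lemma pvFirsts_eq_pvD (l : List Char) : pvFirsts l = pvD l := by
  unfold pvFirsts pvD
  have h : (fun (D : List Char) (c : Char) =>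
      if pvConsCh c && !(D.contains c) then D ++ [c] else D) = pvDStep := by
    funext D c
    unfold pvDStep
    rw [pvConsCh_eq]
    cases h : kiemTraNguyenAm c <;> simp [h]
  rw [h]

lemma pvDStep_eq (D : List Char) (c : Char) :
    pvDStep D c = if kiemTraNguyenAm c = false ∧ c ∉ D then D ++ [c] else D := by
  unfold pvDStep
  by_cases h1 : kiemTraNguyenAm c = false
  · by_cases h2 : c ∈ D
    · rw [if_neg (by simp [h2]), if_neg (by tauto)]
    · rw [if_pos (by simp [h1, h2]), if_pos ⟨h1, h2⟩]
  · rw [if_neg (by simp [h1]), if_neg (by tauto)]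

lemma pvDFold_mem (l : List Char) (D0 : List Char) (c : Char) :
    c ∈ l.foldl pvDStep D0 ↔ c ∈ D0 ∨ (kiemTraNguyenAm c = false ∧ c ∈ l) := by
  induction l generalizing D0 with
  | nil => simp
  | cons x t ih =>
    rw [List.foldl_cons, ih, pvDStep_eq]
    by_cases hx : kiemTraNguyenAm x = false ∧ x ∉ D0
    · rw [if_pos hx]
      constructor
      · rintro (hm | hm)
        · rcases List.mem_append.mp hm with h1 | h1
          · exact Or.inl h1
          · have hcx : c = x := by simpa using h1
            subst hcx
            exact Or.inr ⟨hx.1, List.mem_cons_self ..⟩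
        · exact Or.inr ⟨hm.1, List.mem_cons_of_mem _ hm.2⟩
      · rintro (hm | ⟨hk, hm⟩)
        · exact Or.inl (List.mem_append_left _ hm)
        · rcases List.mem_cons.mp hm with rfl | h1
          · exact Or.inl (List.mem_append_right _ (by simp))
          · exact Or.inr ⟨hk, h1⟩
    · rw [if_neg hx]
      constructor
      · rintro (hm | ⟨hk, hm⟩)
        · exact Or.inl hm
        · exact Or.inr ⟨hk, List.mem_cons_of_mem _ hm⟩
      · rintro (hm | ⟨hk, hm⟩)
        · exact Or.inl hm
        · rcases List.mem_cons.mp hm with rfl | h1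
          · by_cases hmem : c ∈ D0
            · exact Or.inl hmem
            · exact absurd ⟨hk, hmem⟩ hx
          · exact Or.inr ⟨hk, h1⟩

lemma pvD_mem (l : List Char) (c : Char) :
    c ∈ pvD l ↔ kiemTraNguyenAm c = false ∧ c ∈ l := by
  simpa [pvD] using pvDFold_mem l [] c

-- rank of a character: its position in pvD
def pvRk (l : List Char) (c : Char) : Nat := (pvD l).idxOf c

lemma pvRk_lt (l : List Char) (c : Char) (h : c ∈ pvD l) : pvRk l c < (pvD l).length :=
  List.idxOf_lt_length_of_mem h

-- ---- the consonant-pair list and its counts ----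
def pvP (l : List Char) : List (Char × Char) :=
  (l.zip l.tail).filter (fun p => kiemTraNguyenAm p.1 == false && kiemTraNguyenAm p.2 == false)

def pvCnt (l : List Char) (i j : Nat) : Int :=
  ((pvP l).countP (fun p => pvRk l p.1 == i && pvRk l p.2 == j) : Int)

def pvW (l : List Char) (i j : Nat) : Int := pvCnt l i j + pvCnt l j i

lemma pvW_symm (l : List Char) (i j : Nat) : pvW l i j = pvW l j i := by
  unfold pvW
  ring

lemma pvP_mem (l : List Char) (p : Char × Char) (hp : p ∈ pvP l) :
    p.1 ∈ pvD l ∧ p.2 ∈ pvD l := by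
  obtain ⟨hz, hc⟩ := List.mem_filter.mp hp
  have h1 := List.of_mem_zip hz
  simp only [Bool.and_eq_true, beq_iff_eq] at hc
  exact ⟨(pvD_mem l p.1).mpr ⟨hc.1, h1.1⟩,
    (pvD_mem l p.2).mpr ⟨hc.2, List.mem_of_mem_tail h1.2⟩⟩

lemma pvP_rk_lt (l : List Char) (p : Char × Char) (hp : p ∈ pvP l) :
    pvRk l p.1 < (pvD l).length ∧ pvRk l p.2 < (pvD l).length := by
  obtain ⟨h1, h2⟩ := pvP_mem l p hp
  exact ⟨pvRk_lt _ _ h1, pvRk_lt _ _ h2⟩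

lemma pvCnt_eq_zero_of_ge (l : List Char) (i j : Nat)
    (h : (pvD l).length ≤ i ∨ (pvD l).length ≤ j) : pvCnt l i j = 0 := by
  unfold pvCnt
  rw [List.countP_eq_zero.mpr]
  · rfl
  · intro p hp
    obtain ⟨hr1, hr2⟩ := pvP_rk_lt l p hp
    simp only [Bool.and_eq_true, beq_iff_eq, not_and]
    intro h1 h2
    omega

-- the shape of Pre_: every pair of adjacent consonants has both ranks below 19
lemma guard_eq (p : Char × Char) :
    (pvConsCh p.1 && pvConsCh p.2)
      = (kiemTraNguyenAm p.1 == false && kiemTraNguyenAm p.2 == false) := by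
  rw [pvConsCh_eq, pvConsCh_eq]
  cases h1 : kiemTraNguyenAm p.1 <;> cases h2 : kiemTraNguyenAm p.2 <;> simp [h1, h2]

lemma pre_iff (s : String) :
    Pre_consonant s ↔
      ∀ p ∈ pvP s.toList, pvRk s.toList p.1 < 19 ∧ pvRk s.toList p.2 < 19 := by
  unfold Pre_consonant pvP pvRk
  rw [pvFirsts_eq_pvD]
  constructor
  · intro h p hp
    obtain ⟨hz, hc⟩ := List.mem_filter.mp hp
    exact h p hz (by rw [guard_eq]; exact hc)
  · intro h p hz hg
    exact h p (List.mem_filter.mpr ⟨hz, by rw [← guard_eq]; exact hg⟩)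

lemma pvCnt_eq_zero_of_ge19 (l : List Char)
    (hp : ∀ p ∈ pvP l, pvRk l p.1 < 19 ∧ pvRk l p.2 < 19) (i j : Nat)
    (h : 19 ≤ i ∨ 19 ≤ j) : pvCnt l i j = 0 := by
  unfold pvCnt
  rw [List.countP_eq_zero.mpr]
  · rfl
  · intro p hpp
    obtain ⟨hr1, hr2⟩ := hp p hpp
    simp only [Bool.and_eq_true, beq_iff_eq, not_and]
    intro h1 h2
    omega

def invA (D : List Char) (st : List Int × Int) : Prop :=
  st.1.length = 256 ∧ st.2 = (D.length : Int) ∧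
  ∀ c : Char, c.toNat < 256 →
    st.1.getD c.toNat (-1) = (if D.contains c then ((D.idxOf c : Nat) : Int) else -1)

lemma aStep_inv (D : List Char) (st : List Int × Int) (c : Char)
    (hdom : c.toNat < 256) (h : invA D st) : invA (pvDStep D c) (aStep st c) := by
  obtain ⟨hlen, hidx, hent⟩ := h
  rw [pvDStep_eq]
  unfold aStep
  simp only [PySem.List.pyGetD_natCast, PySem.List.pySetD_natCast]
  by_cases hv : kiemTraNguyenAm c = false
  · by_cases hmem : c ∈ D
    · have hcont : D.contains c = true := by simpa using hmem
      have hval : st.1.getD c.toNat (-1) = ((D.idxOf c : Nat) : Int) := by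
        rw [hent c hdom, if_pos hcont]
      rw [if_neg (by tauto),
        if_neg (by rw [List.getD_eq_getElem?_getD] at hval; simp [hval, hv])]
      exact ⟨hlen, hidx, hent⟩
    · have hcont : D.contains c = false := by simpa using hmem
      have hval : st.1.getD c.toNat (-1) = -1 := by
        rw [hent c hdom, if_neg (by simpa using hmem)]
      rw [if_pos ⟨hv, hmem⟩,
        if_pos (by rw [List.getD_eq_getElem?_getD] at hval; simp [hval, hv])]
      refine ⟨by simpa using hlen, by rw [hidx]; push_cast; simp, ?_⟩
      intro c' h256
      by_cases hcc : c' = c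
      · subst hcc
        rw [List.getD_eq_getElem?_getD, List.getElem?_set_self (by omega), Option.getD_some]
        rw [if_pos (by simp), List.idxOf_append_of_notMem hmem]
        simp [hidx]
      · have hnn : c.toNat ≠ c'.toNat := fun hh => hcc (char_toNat_inj hh.symm)
        rw [List.getD_eq_getElem?_getD, List.getElem?_set_ne hnn, ← List.getD_eq_getElem?_getD,
          hent c' h256]
        have hcont' : (D ++ [c]).contains c' = D.contains c' := by simp [hcc]
        rw [hcont']
        by_cases hm' : c' ∈ D
        · rw [List.idxOf_append_of_mem hm']
        · have hf' : D.contains c' = false := by simpa using hm'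
          rw [hf']
          simp
  · rw [if_neg (by tauto), if_neg (by simp [hv])]
    exact ⟨hlen, hidx, hent⟩

lemma aFold_inv (l : List Char) (D : List Char) (st : List Int × Int)
    (hdom : ∀ c ∈ l, c.toNat < 256) (h : invA D st) :
    invA (l.foldl pvDStep D) (l.foldl aStep st) := by
  induction l generalizing D st with
  | nil => exact h
  | cons c t ih =>
    rw [List.foldl_cons, List.foldl_cons]
    exact ih _ _ (fun c' hc' => hdom c' (List.mem_cons_of_mem _ hc'))
      (aStep_inv D st c (hdom c (List.mem_cons_self ..)) h)

lemma aFold_pvD (l : List Char) (hdom : ∀ c ∈ l, c.toNat < 256) :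
    invA (pvD l) (l.foldl aStep (List.replicate 256 (-1 : Int), 0)) := by
  refine aFold_inv l [] _ hdom ⟨List.length_replicate .., by simp, ?_⟩
  intro c h256
  rw [List.getD_eq_getElem?_getD]
  rw [List.getElem?_replicate]
  rw [if_pos h256]
  simp

def invB (D : List Char) (d : PySem.Dict Char Int) : Prop :=
  d.size = D.length ∧
  ∀ c : Char, d.get? c = (if D.contains c then some ((D.idxOf c : Nat) : Int) else none)

lemma bStep_inv (D : List Char) (d : PySem.Dict Char Int) (c : Char)
    (h : invB D d) : invB (pvDStep D c) (bStep d c) := by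
  obtain ⟨hsz, hent⟩ := h
  rw [pvDStep_eq]
  unfold bStep
  rw [inVowels_eq]
  have hcont : d.contains c = (D.contains c) := by
    rw [PySem.Dict.contains_eq_isSome_get?, hent c]
    by_cases hm : c ∈ D <;> simp [hm]
  by_cases hv : kiemTraNguyenAm c = false
  · by_cases hmem : c ∈ D
    · rw [if_neg (by tauto), if_neg (by simp [hv, hcont, hmem])]
      exact ⟨hsz, hent⟩
    · have hcf : D.contains c = false := by simpa using hmem
      rw [if_pos ⟨hv, hmem⟩, if_pos (by simp [hv, hcont, hmem])]
      constructor
      · have hdc : d.contains c = false := by rw [hcont, hcf]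
        simp only [PySem.Dict.size, PySem.Dict.insert, hdc, Bool.false_eq_true, if_false,
          List.length_append, List.length_singleton]
        rw [← PySem.Dict.size.eq_1, hsz]
      · intro c'
        by_cases hcc : c' = c
        · subst hcc
          rw [PySem.Dict.get?_insert_self, if_pos (by simp),
            List.idxOf_append_of_notMem hmem]
          simp [hsz]
        · rw [PySem.Dict.get?_insert_of_ne _ _ hcc, hent c']
          have : (D ++ [c]).contains c' = D.contains c' := by simp [hcc]
          rw [this]
          by_cases hm' : c' ∈ D
          · rw [List.idxOf_append_of_mem hm']
          · have hf' : D.contains c' = false := by simpa using hm'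
            rw [hf']
            simp
  · rw [if_neg (by tauto), if_neg (by simp [hv])]
    exact ⟨hsz, hent⟩

lemma bFold_pvD (l : List Char) :
    invB (pvD l) (l.foldl bStep PySem.Dict.empty) := by
  have main : ∀ (t : List Char) (D : List Char) (d : PySem.Dict Char Int),
      invB D d → invB (t.foldl pvDStep D) (t.foldl bStep d) := by
    intro t
    induction t with
    | nil => intro D d h; exact h
    | cons c tt ih =>
      intro D d h
      rw [List.foldl_cons, List.foldl_cons]
      exact ih _ _ (bStep_inv D d c h)
  refine main l [] _ ⟨by simp [PySem.Dict.size, PySem.Dict.empty], ?_⟩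
  intro c
  simp [PySem.Dict.get?_empty]

-- ---- matrices: entries, squares, bumps ----
def pvE (M : List (List Int)) (i j : Nat) : Int := (M.getD i []).getD j 0

def pvSq (M : List (List Int)) (n : Nat) : Prop := M.length = n ∧ ∀ r ∈ M, r.length = n

lemma pvE_zero (n i j : Nat) : pvE (List.replicate n (List.replicate n (0 : Int))) i j = 0 := by
  unfold pvE
  rcases lt_or_ge i n with hi | hi
  · have hrow : (List.replicate n (List.replicate n (0:Int))).getD i [] = List.replicate n 0 := by
      rw [List.getD_eq_getElem?_getD, List.getElem?_replicate, if_pos hi]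
      rfl
    rw [hrow]
    rcases lt_or_ge j n with hj | hj
    · rw [List.getD_eq_getElem?_getD, List.getElem?_replicate, if_pos hj]
      rfl
    · rw [List.getD_eq_getElem?_getD, List.getElem?_replicate, if_neg (by omega)]
      rfl
  · have hrow : (List.replicate n (List.replicate n (0:Int))).getD i [] = [] := by
      rw [List.getD_eq_getElem?_getD, List.getElem?_replicate, if_neg (by omega)]
      rfl
    rw [hrow]
    simp

lemma pvSq_zero (n : Nat) : pvSq (List.replicate n (List.replicate n (0 : Int))) n := by
  refine ⟨by simp, ?_⟩
  intro r hr
  rw [List.eq_of_mem_replicate hr]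
  simp

lemma matBump_sq {M : List (List Int)} {n : Nat} (h : pvSq M n) {u v : Nat}
    (hu : u < n) (hv : v < n) : pvSq (matBump M (u : Int) (v : Int)) n := by
  obtain ⟨h1, h2⟩ := h
  unfold matBump
  simp only [PySem.List.pySetD_natCast, PySem.List.pyGetD_natCast]
  refine ⟨by simpa using h1, ?_⟩
  intro r hr
  rcases List.mem_or_eq_of_mem_set hr with hr' | rfl
  · exact h2 r hr'
  · rw [List.length_set]
    have hrow : M.getD u [] = M[u]'(by omega) := List.getD_eq_getElem _ _ (by omega)
    rw [hrow]
    exact h2 _ (List.getElem_mem _)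

lemma pvE_matBump {M : List (List Int)} {n : Nat} (h : pvSq M n) {u v : Nat}
    (hu : u < n) (hv : v < n) (i j : Nat) :
    pvE (matBump M (u : Int) (v : Int)) i j =
      (if i = u ∧ j = v then pvE M i j + 1 else pvE M i j) := by
  obtain ⟨h1, h2⟩ := h
  have hrowlen : (M.getD u []).length = n := by
    have hrow : M.getD u [] = M[u]'(by omega) := List.getD_eq_getElem _ _ (by omega)
    rw [hrow]
    exact h2 _ (List.getElem_mem _)
  unfold matBump pvE
  simp only [PySem.List.pySetD_natCast, PySem.List.pyGetD_natCast]
  by_cases hiu : i = u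
  · subst hiu
    have hset : (M.set i ((M.getD i []).set v ((M.getD i []).getD v 0 + 1))).getD i [] =
        (M.getD i []).set v ((M.getD i []).getD v 0 + 1) := by
      rw [List.getD_eq_getElem?_getD, List.getElem?_set_self (by omega)]
      rfl
    rw [hset]
    by_cases hjv : j = v
    · subst hjv
      rw [if_pos ⟨rfl, rfl⟩, List.getD_eq_getElem?_getD, List.getElem?_set_self (by omega)]
      rfl
    · rw [if_neg (by tauto), List.getD_eq_getElem?_getD, List.getElem?_set_ne (by omega),
        ← List.getD_eq_getElem?_getD]
  · have hset : (M.set u ((M.getD u []).set v ((M.getD u []).getD v 0 + 1))).getD i [] =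
        M.getD i [] := by
      rw [List.getD_eq_getElem?_getD, List.getElem?_set_ne (by omega), ← List.getD_eq_getElem?_getD]
    rw [hset, if_neg (by tauto)]

-- ---- counting bumps over a fold ----
lemma bump_fold {α : Type} (q : List α) (k1 k2 : α → Nat) (n : Nat)
    (hq : ∀ p ∈ q, k1 p < n ∧ k2 p < n) (M : List (List Int)) (hM : pvSq M n) :
    pvSq (q.foldl (fun M p => matBump M (k1 p : Int) (k2 p : Int)) M) n ∧
    ∀ i j : Nat, pvE (q.foldl (fun M p => matBump M (k1 p : Int) (k2 p : Int)) M) i j =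
      pvE M i j + (q.countP (fun p => k1 p == i && k2 p == j) : Int) := by
  induction q generalizing M with
  | nil => exact ⟨hM, by simp⟩
  | cons p t ih =>
    have hp := hq p (List.mem_cons_self ..)
    have hM' := matBump_sq hM hp.1 hp.2
    obtain ⟨hsq, hent⟩ := ih (fun p hp' => hq p (List.mem_cons_of_mem _ hp')) _ hM'
    refine ⟨hsq, ?_⟩
    intro i j
    rw [List.foldl_cons, hent i j, pvE_matBump hM hp.1 hp.2 i j]
    rw [List.countP_cons]
    by_cases hc : i = k1 p ∧ j = k2 p
    · rw [if_pos hc]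
      have : (k1 p == i && k2 p == j) = true := by simp [hc.1, hc.2]
      rw [this]
      simp
      ring
    · rw [if_neg hc]
      have : (k1 p == i && k2 p == j) = false := by
        simp only [Bool.and_eq_false_iff, beq_eq_false_iff_ne]
        by_cases h1 : i = k1 p
        · exact Or.inr (fun hh => hc ⟨h1, hh.symm⟩)
        · exact Or.inl (fun hh => h1 hh.symm)
      rw [this]
      simp

lemma bump2_fold {α : Type} (q : List α) (k1 k2 : α → Nat) (n : Nat)
    (hq : ∀ p ∈ q, k1 p < n ∧ k2 p < n) (M : List (List Int)) (hM : pvSq M n) :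
    pvSq (q.foldl (fun M p => matBump (matBump M (k1 p : Int) (k2 p : Int)) (k2 p : Int) (k1 p : Int)) M) n ∧
    ∀ i j : Nat, pvE (q.foldl (fun M p => matBump (matBump M (k1 p : Int) (k2 p : Int)) (k2 p : Int) (k1 p : Int)) M) i j =
      pvE M i j + (q.countP (fun p => k1 p == i && k2 p == j) : Int)
               + (q.countP (fun p => k1 p == j && k2 p == i) : Int) := by
  induction q generalizing M with
  | nil => exact ⟨hM, by simp⟩
  | cons p t ih =>
    have hp := hq p (List.mem_cons_self ..)
    have hM1 := matBump_sq hM hp.1 hp.2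
    have hM2 := matBump_sq hM1 hp.2 hp.1
    obtain ⟨hsq, hent⟩ := ih (fun p hp' => hq p (List.mem_cons_of_mem _ hp')) _ hM2
    refine ⟨hsq, ?_⟩
    intro i j
    rw [List.foldl_cons, hent i j, pvE_matBump hM1 hp.2 hp.1 i j, pvE_matBump hM hp.1 hp.2 i j]
    rw [List.countP_cons, List.countP_cons]
    have e1 : (k1 p == i && k2 p == j) = decide (i = k1 p ∧ j = k2 p) := by
      by_cases h : i = k1 p ∧ j = k2 p
      · simp [h.1, h.2]
      · simp only [decide_eq_false h, Bool.and_eq_false_iff, beq_eq_false_iff_ne]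
        by_cases h1 : i = k1 p
        · exact Or.inr (fun hh => h ⟨h1, hh.symm⟩)
        · exact Or.inl (fun hh => h1 hh.symm)
    have e2 : (k1 p == j && k2 p == i) = decide (i = k2 p ∧ j = k1 p) := by
      by_cases h : i = k2 p ∧ j = k1 p
      · simp [h.1, h.2]
      · simp only [decide_eq_false h, Bool.and_eq_false_iff, beq_eq_false_iff_ne]
        by_cases h1 : j = k1 p
        · exact Or.inr (fun hh => h ⟨hh.symm, h1⟩)
        · exact Or.inl (fun hh => h1 hh.symm)
    rw [e1, e2]
    by_cases hA : i = k1 p ∧ j = k2 p <;> by_cases hB : i = k2 p ∧ j = k1 p <;>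
      simp [hA, hB] <;> split_ifs <;> push_cast <;> ring

-- ---- the two index lookups give pvRk ----
lemma aLookup (l : List Char) (c : Char) (hc : c ∈ pvD l)
    (hdom : ∀ c' ∈ l, c'.toNat < 256) :
    PySem.List.pyGetD (l.foldl aStep (List.replicate 256 (-1 : Int), 0)).1
      (c.toNat : Int) (-1) = (pvRk l c : Int) := by
  obtain ⟨hlen, hidx, hent⟩ := aFold_pvD l hdom
  rw [PySem.List.pyGetD_natCast, hent c (hdom c ((pvD_mem l c).mp hc).2),
    if_pos (by simpa using hc)]
  rfl

lemma bLookup (l : List Char) (c : Char) (hc : c ∈ pvD l) (z : Int) :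
    (l.foldl bStep PySem.Dict.empty).getD c z = (pvRk l c : Int) := by
  obtain ⟨hsz, hent⟩ := bFold_pvD l
  rw [PySem.Dict.getD_eq_get?_getD, hent c, if_pos (by simpa using hc)]
  rfl

-- ---- A's frequency matrix has entries pvCnt ----
lemma aFreq_spec (l : List Char) (hdom : ∀ c ∈ l, c.toNat < 256)
    (hp : ∀ p ∈ pvP l, pvRk l p.1 < 19 ∧ pvRk l p.2 < 19) :
    ∀ i j : Nat,
      pvE ((l.zip l.tail).foldl (fun freq p =>
        if kiemTraNguyenAm p.1 == false && kiemTraNguyenAm p.2 == false then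
          matBump freq
            (PySem.List.pyGetD (l.foldl aStep (List.replicate 256 (-1 : Int), 0)).1 (p.1.toNat : Int) (-1))
            (PySem.List.pyGetD (l.foldl aStep (List.replicate 256 (-1 : Int), 0)).1 (p.2.toNat : Int) (-1))
        else freq) (List.replicate 19 (List.replicate 19 (0 : Int)))) i j = pvCnt l i j := by
  intro i j
  rw [PySem.List.foldl_if_eq_foldl_filter]
  have hfilter : (l.zip l.tail).filter
      (fun p => kiemTraNguyenAm p.1 == false && kiemTraNguyenAm p.2 == false) = pvP l := rfl
  rw [hfilter]
  have hcongr : (pvP l).foldl (fun freq p =>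
      matBump freq
        (PySem.List.pyGetD (l.foldl aStep (List.replicate 256 (-1 : Int), 0)).1 (p.1.toNat : Int) (-1))
        (PySem.List.pyGetD (l.foldl aStep (List.replicate 256 (-1 : Int), 0)).1 (p.2.toNat : Int) (-1)))
      (List.replicate 19 (List.replicate 19 (0 : Int))) =
    (pvP l).foldl (fun freq p =>
      matBump freq ((pvRk l p.1 : Nat) : Int) ((pvRk l p.2 : Nat) : Int))
      (List.replicate 19 (List.replicate 19 (0 : Int))) := by
    refine PySem.List.foldl_congr_mem _ _ _ _ ?_
    intro acc p hp'
    obtain ⟨h1, h2⟩ := pvP_mem l p hp'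
    rw [aLookup l p.1 h1 hdom, aLookup l p.2 h2 hdom]
  rw [hcongr]
  obtain ⟨hsq, hent⟩ := bump_fold (pvP l) (fun p => pvRk l p.1) (fun p => pvRk l p.2) 19
    (fun p hp' => hp p hp')
    (List.replicate 19 (List.replicate 19 (0 : Int))) (pvSq_zero 19)
  rw [hent i j, pvE_zero]
  unfold pvCnt
  ring

-- ---- B's weight matrix has entries pvW, and is square of size k ----
lemma bG_spec (l : List Char) :
    pvSq ((l.zip l.tail).foldl (fun g p =>
        if !(inVowels p.1) && !(inVowels p.2) then
          matBump (matBump g ((l.foldl bStep PySem.Dict.empty).getD p.1 0)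
              ((l.foldl bStep PySem.Dict.empty).getD p.2 0))
            ((l.foldl bStep PySem.Dict.empty).getD p.2 0)
            ((l.foldl bStep PySem.Dict.empty).getD p.1 0)
        else g)
        (List.replicate (l.foldl bStep PySem.Dict.empty).size
          (List.replicate (l.foldl bStep PySem.Dict.empty).size (0 : Int))))
      (pvD l).length ∧
    ∀ i j : Nat,
      pvE ((l.zip l.tail).foldl (fun g p =>
        if !(inVowels p.1) && !(inVowels p.2) then
          matBump (matBump g ((l.foldl bStep PySem.Dict.empty).getD p.1 0)
              ((l.foldl bStep PySem.Dict.empty).getD p.2 0))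
            ((l.foldl bStep PySem.Dict.empty).getD p.2 0)
            ((l.foldl bStep PySem.Dict.empty).getD p.1 0)
        else g)
        (List.replicate (l.foldl bStep PySem.Dict.empty).size
          (List.replicate (l.foldl bStep PySem.Dict.empty).size (0 : Int)))) i j = pvW l i j := by
  have hsz : (l.foldl bStep PySem.Dict.empty).size = (pvD l).length := (bFold_pvD l).1
  have hguard : ∀ p : Char × Char,
      (!(inVowels p.1) && !(inVowels p.2)) =
      (kiemTraNguyenAm p.1 == false && kiemTraNguyenAm p.2 == false) := by
    intro p
    rw [inVowels_eq, inVowels_eq]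
    by_cases h1 : kiemTraNguyenAm p.1 <;> by_cases h2 : kiemTraNguyenAm p.2 <;> simp [h1, h2]
  have hfun : (fun (g : List (List Int)) (p : Char × Char) =>
      if !(inVowels p.1) && !(inVowels p.2) then
        matBump (matBump g ((l.foldl bStep PySem.Dict.empty).getD p.1 0)
            ((l.foldl bStep PySem.Dict.empty).getD p.2 0))
          ((l.foldl bStep PySem.Dict.empty).getD p.2 0)
          ((l.foldl bStep PySem.Dict.empty).getD p.1 0)
      else g) =
      (fun (g : List (List Int)) (p : Char × Char) =>
      if kiemTraNguyenAm p.1 == false && kiemTraNguyenAm p.2 == false then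
        matBump (matBump g ((l.foldl bStep PySem.Dict.empty).getD p.1 0)
            ((l.foldl bStep PySem.Dict.empty).getD p.2 0))
          ((l.foldl bStep PySem.Dict.empty).getD p.2 0)
          ((l.foldl bStep PySem.Dict.empty).getD p.1 0)
      else g) := by
    funext g p
    rw [hguard p]
  rw [hfun, hsz, PySem.List.foldl_if_eq_foldl_filter]
  have hfilter : (l.zip l.tail).filter
      (fun p => kiemTraNguyenAm p.1 == false && kiemTraNguyenAm p.2 == false) = pvP l := rfl
  rw [hfilter]
  have hcongr : (pvP l).foldl (fun g p =>
      matBump (matBump g ((l.foldl bStep PySem.Dict.empty).getD p.1 0)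
          ((l.foldl bStep PySem.Dict.empty).getD p.2 0))
        ((l.foldl bStep PySem.Dict.empty).getD p.2 0)
        ((l.foldl bStep PySem.Dict.empty).getD p.1 0))
      (List.replicate (pvD l).length (List.replicate (pvD l).length (0 : Int))) =
    (pvP l).foldl (fun g p =>
      matBump (matBump g ((pvRk l p.1 : Nat) : Int) ((pvRk l p.2 : Nat) : Int))
        ((pvRk l p.2 : Nat) : Int) ((pvRk l p.1 : Nat) : Int))
      (List.replicate (pvD l).length (List.replicate (pvD l).length (0 : Int))) := by
    refine PySem.List.foldl_congr_mem _ _ _ _ ?_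
    intro acc p hp
    obtain ⟨h1, h2⟩ := pvP_mem l p hp
    rw [bLookup l p.1 h1, bLookup l p.2 h2]
  rw [hcongr]
  obtain ⟨hsq, hent⟩ := bump2_fold (pvP l) (fun p => pvRk l p.1) (fun p => pvRk l p.2)
    (pvD l).length
    (fun p hp => ⟨(pvP_rk_lt l p hp).1, (pvP_rk_lt l p hp).2⟩)
    (List.replicate (pvD l).length (List.replicate (pvD l).length (0 : Int)))
    (pvSq_zero _)
  refine ⟨hsq, ?_⟩
  intro i j
  rw [hent i j, pvE_zero]
  unfold pvW pvCnt
  ring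

-- ---- sums toolkit ----
lemma foldl_guard_add {α : Type} (xs : List α) (p : α → Bool) (g : α → Int) (a : Int) :
    xs.foldl (fun acc x => if p x then acc + g x else acc) a
      = a + ((xs.filter p).map g).sum := by
  rw [PySem.List.foldl_if_eq_foldl_filter, PySem.List.foldl_add]

lemma range_filter_sum (n : Nat) (p : Nat → Bool) (g : Nat → Int) :
    (((List.range n).filter p).map g).sum = ∑ i ∈ Finset.range n, if p i then g i else 0 := by
  induction n with
  | zero => simp
  | succ n ih =>
    rw [List.range_succ, List.filter_append, List.map_append, List.sum_append,
      Finset.sum_range_succ, ih]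
    by_cases hp : p n <;> simp [hp]

lemma sum_eq_sum_getD (l : List Int) :
    l.sum = ∑ i ∈ Finset.range l.length, l.getD i 0 := by
  induction l with
  | nil => simp
  | cons x t ih =>
    simp only [List.sum_cons, List.length_cons, Finset.sum_range_succ',
      List.getD_cons_succ, List.getD_cons_zero, ih]
    ring

-- extend a vanishing-outside-r double sum to a larger square
lemma sum2_extend (r N : Nat) (hrN : r ≤ N) (F : Nat → Nat → Int)
    (h0 : ∀ i j : Nat, r ≤ i ∨ r ≤ j → F i j = 0) :
    (∑ i ∈ Finset.range r, ∑ j ∈ Finset.range r, F i j)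
      = ∑ i ∈ Finset.range N, ∑ j ∈ Finset.range N, F i j := by
  have hsub : Finset.range r ⊆ Finset.range N := fun x hx =>
    Finset.mem_range.mpr (lt_of_lt_of_le (Finset.mem_range.mp hx) hrN)
  have hin : ∀ i : Nat, (∑ j ∈ Finset.range r, F i j) = ∑ j ∈ Finset.range N, F i j := by
    intro i
    refine Finset.sum_subset hsub ?_
    intro j _ hj
    exact h0 i j (Or.inr (by simpa using hj))
  calc (∑ i ∈ Finset.range r, ∑ j ∈ Finset.range r, F i j)
      = ∑ i ∈ Finset.range r, ∑ j ∈ Finset.range N, F i j :=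
        Finset.sum_congr rfl fun i _ => hin i
    _ = ∑ i ∈ Finset.range N, ∑ j ∈ Finset.range N, F i j := by
        refine Finset.sum_subset hsub ?_
        intro i _ hi
        exact Finset.sum_eq_zero fun j _ => h0 i j (Or.inl (by simpa using hi))

-- ---- bits toolkit ----
lemma intCast_shift_band (m i : Nat) :
    PySem.Int.band ((m : Int) >>> ((i : Nat) : Int)) 1 = if m.testBit i then 1 else 0 := by
  rw [Int.shiftRight_natCast_right, ← Int.natCast_shiftRight]
  rw [show (1 : Int) = ((1 : Nat) : Int) from rfl, PySem.Int.band_natCast]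
  have h2 : m >>> i &&& 1 = (m >>> i) % 2 := Nat.and_one_is_mod _
  rw [h2, Nat.testBit]
  rcases Nat.mod_two_eq_zero_or_one (m >>> i) with hb | hb <;> simp [hb]

lemma testBit_add_pow (r b i : Nat) (h : r < 2 ^ b) :
    (r + 2 ^ b).testBit i = (if i = b then true else r.testBit i) := by
  rcases lt_trichotomy i b with hi | hi | hi
  · rw [if_neg (by omega), Nat.add_comm, Nat.testBit_two_pow_add_gt hi]
  · subst hi
    rw [if_pos rfl, Nat.add_comm, Nat.testBit_two_pow_add_eq]
    simp [Nat.testBit_lt_two_pow h]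
  · rw [if_neg (by omega)]
    have hb1 : (2:ℕ)^(b+1) ≤ 2^i := Nat.pow_le_pow_right (by norm_num) (by omega)
    rw [Nat.testBit_lt_two_pow, Nat.testBit_lt_two_pow]
    · exact h.trans_le (Nat.pow_le_pow_right (by norm_num) (by omega))
    · have : (2:ℕ)^b + 2^b = 2^(b+1) := by ring
      omega

-- ---- the alternation value of a mask ----
def pvK (l : List Char) : Nat := (pvD l).length

def pvCut (l : List Char) (m : Nat) : Int :=
  ∑ i ∈ Finset.range (pvK l), ∑ j ∈ Finset.range (pvK l),
    if m.testBit i ∧ ¬ m.testBit j then pvW l i j else 0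

-- the generic ≠-guard / ∧-guard split on any square range
lemma cut_split (n : Nat) (cnt : Nat → Nat → Int) (m : Nat) :
    (∑ i ∈ Finset.range n, ∑ j ∈ Finset.range n,
      if m.testBit i ≠ m.testBit j then cnt i j else 0)
    = ∑ i ∈ Finset.range n, ∑ j ∈ Finset.range n,
        if m.testBit i ∧ ¬ m.testBit j then cnt i j + cnt j i else 0 := by
  have hsplit : ∀ i j : Nat,
      (if m.testBit i ≠ m.testBit j then cnt i j else 0)
      = (if m.testBit i ∧ ¬ m.testBit j then cnt i j else 0)
        + (if m.testBit j ∧ ¬ m.testBit i then cnt i j else 0) := by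
    intro i j
    cases h1 : m.testBit i <;> cases h2 : m.testBit j <;> simp [h1, h2]
  calc (∑ i ∈ Finset.range n, ∑ j ∈ Finset.range n,
        if m.testBit i ≠ m.testBit j then cnt i j else 0)
      = (∑ i ∈ Finset.range n, ∑ j ∈ Finset.range n,
          ((if m.testBit i ∧ ¬ m.testBit j then cnt i j else 0)
            + (if m.testBit j ∧ ¬ m.testBit i then cnt i j else 0))) := by
        refine Finset.sum_congr rfl fun i _ => Finset.sum_congr rfl fun j _ => hsplit i j
    _ = (∑ i ∈ Finset.range n, ∑ j ∈ Finset.range n,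
          (if m.testBit i ∧ ¬ m.testBit j then cnt i j else 0))
        + (∑ i ∈ Finset.range n, ∑ j ∈ Finset.range n,
          (if m.testBit j ∧ ¬ m.testBit i then cnt i j else 0)) := by
        rw [← Finset.sum_add_distrib]
        refine Finset.sum_congr rfl fun i _ => by rw [← Finset.sum_add_distrib]
    _ = (∑ i ∈ Finset.range n, ∑ j ∈ Finset.range n,
          (if m.testBit i ∧ ¬ m.testBit j then cnt i j else 0))
        + (∑ i ∈ Finset.range n, ∑ j ∈ Finset.range n,
          (if m.testBit i ∧ ¬ m.testBit j then cnt j i else 0)) := by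
        congr 1
        rw [Finset.sum_comm]
    _ = ∑ i ∈ Finset.range n, ∑ j ∈ Finset.range n,
          (if m.testBit i ∧ ¬ m.testBit j then cnt i j + cnt j i else 0) := by
        rw [← Finset.sum_add_distrib]
        refine Finset.sum_congr rfl fun i _ => ?_
        rw [← Finset.sum_add_distrib]
        refine Finset.sum_congr rfl fun j _ => ?_
        split_ifs <;> simp

-- A's 19×19 double scan computes pvCut, given that all adjacent-pair ranks are below 19
lemma cutA_eq_pvCut (l : List Char)
    (hp : ∀ p ∈ pvP l, pvRk l p.1 < 19 ∧ pvRk l p.2 < 19) (m : Nat) :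
    (∑ i ∈ Finset.range 19, ∑ j ∈ Finset.range 19,
      if m.testBit i ≠ m.testBit j then pvCnt l i j else 0) = pvCut l m := by
  have hN19 : (19 : Nat) ≤ 19 + pvK l := by omega
  have hNK : pvK l ≤ 19 + pvK l := by omega
  have hz19 : ∀ i j : Nat, 19 ≤ i ∨ 19 ≤ j →
      (if m.testBit i ≠ m.testBit j then pvCnt l i j else 0) = 0 := by
    intro i j h
    rw [pvCnt_eq_zero_of_ge19 l hp i j h]
    split_ifs <;> rfl
  have hzK : ∀ i j : Nat, pvK l ≤ i ∨ pvK l ≤ j →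
      (if m.testBit i ∧ ¬ m.testBit j then pvW l i j else 0) = 0 := by
    intro i j h
    have hw : pvW l i j = 0 := by
      unfold pvW
      rw [pvCnt_eq_zero_of_ge l i j h, pvCnt_eq_zero_of_ge l j i (by tauto)]
      simp
    rw [hw]
    split_ifs <;> rfl
  calc (∑ i ∈ Finset.range 19, ∑ j ∈ Finset.range 19,
        if m.testBit i ≠ m.testBit j then pvCnt l i j else 0)
      = ∑ i ∈ Finset.range (19 + pvK l), ∑ j ∈ Finset.range (19 + pvK l),
          if m.testBit i ≠ m.testBit j then pvCnt l i j else 0 :=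
        sum2_extend 19 (19 + pvK l) hN19 _ hz19
    _ = ∑ i ∈ Finset.range (19 + pvK l), ∑ j ∈ Finset.range (19 + pvK l),
          if m.testBit i ∧ ¬ m.testBit j then pvCnt l i j + pvCnt l j i else 0 :=
        cut_split (19 + pvK l) (pvCnt l) m
    _ = ∑ i ∈ Finset.range (19 + pvK l), ∑ j ∈ Finset.range (19 + pvK l),
          if m.testBit i ∧ ¬ m.testBit j then pvW l i j else 0 := by
        refine Finset.sum_congr rfl fun i _ => Finset.sum_congr rfl fun j _ => ?_
        unfold pvW
        rfl
    _ = ∑ i ∈ Finset.range (pvK l), ∑ j ∈ Finset.range (pvK l),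
          if m.testBit i ∧ ¬ m.testBit j then pvW l i j else 0 :=
        (sum2_extend (pvK l) (19 + pvK l) hNK _ hzK).symm
    _ = pvCut l m := rfl

lemma range_map_sum (n : Nat) (g : Nat → Int) :
    (((List.range n).map g).sum) = ∑ i ∈ Finset.range n, g i := by
  have h := range_filter_sum n (fun _ => true) g
  simpa using h

lemma pyRange19 : PySem.List.pyRange 0 19 1 = (List.range 19).map (fun k => ((k : Nat) : Int)) := by
  rw [PySem.List.pyRange_one]
  norm_num
  rfl

lemma bne_ite_bits (m : Nat) (i j : Nat) :
    (((if m.testBit i then (1:Int) else 0) != (if m.testBit j then (1:Int) else 0))) =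
      (m.testBit i != m.testBit j) := by
  cases h1 : m.testBit i <;> cases h2 : m.testBit j <;> simp

-- A's per-mask double scan, as a Finset sum
lemma doubleScan (freq : List (List Int)) (m : Nat) :
    (PySem.List.pyRange 0 19 1).foldl (fun acc i =>
      (PySem.List.pyRange 0 19 1).foldl (fun acc j =>
        if PySem.Int.band (((m : Nat) : Int) >>> i.toNat) 1 !=
            PySem.Int.band (((m : Nat) : Int) >>> j.toNat) 1 then
          acc + PySem.List.pyGetD (PySem.List.pyGetD freq i []) j 0
        else acc) acc) 0
    = ∑ i ∈ Finset.range 19, ∑ j ∈ Finset.range 19,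
        if m.testBit i ≠ m.testBit j then pvE freq i j else 0 := by
  rw [pyRange19]
  simp only [List.foldl_map, Int.toNat_natCast, intCast_shift_band, bne_ite_bits,
    PySem.List.pyGetD_natCast]
  have hin : ∀ (acc : Int) (i : Nat),
      List.foldl (fun acc j =>
        if (m.testBit i != m.testBit j) = true then
          acc + (freq.getD i []).getD j 0
        else acc) acc (List.range 19)
      = acc + ∑ j ∈ Finset.range 19,
          if m.testBit i ≠ m.testBit j then pvE freq i j else 0 := by
    intro acc i
    rw [foldl_guard_add, range_filter_sum]
    congr 1
    refine Finset.sum_congr rfl ?_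
    intro j _
    simp only [bne_iff_ne, pvE]
  rw [PySem.List.foldl_congr_mem _ _
    (fun (acc : Int) (i : Nat) => acc + ∑ j ∈ Finset.range 19,
      if m.testBit i ≠ m.testBit j then pvE freq i j else 0) _
    (fun acc i _ => hin acc i)]
  rw [PySem.List.foldl_add, range_map_sum]
  simp

lemma beq_ite_bits (tb : Bool) : (((if tb then (1:Int) else 0)) == 1) = tb := by
  cases tb <;> simp

lemma pyRangeK (k : Nat) :
    PySem.List.pyRange 0 (k : Int) 1 = (List.range k).map (fun j => ((j : Nat) : Int)) := by
  rw [PySem.List.pyRange_one]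
  norm_num

-- B's cross loop, as a Finset sum
lemma crossScan (g : List (List Int)) (b : Int) (m2 k : Nat) :
    (PySem.List.pyRange 0 (k : Int) 1).foldl (fun acc j =>
      if PySem.Int.band (((m2 : Nat) : Int) >>> j.toNat) 1 == 1 then
        acc + PySem.List.pyGetD (PySem.List.pyGetD g b []) j 0
      else acc) 0
    = ∑ j ∈ Finset.range k,
        if m2.testBit j then (PySem.List.pyGetD g b []).getD j 0 else 0 := by
  rw [pyRangeK]
  simp only [List.foldl_map, Int.toNat_natCast, intCast_shift_band, beq_ite_bits,
    PySem.List.pyGetD_natCast]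
  rw [foldl_guard_add, range_filter_sum]
  simp

-- the DP recurrence for pvCut
lemma cut_step (l : List Char) (bn mn : Nat) (hb : bn < pvK l) (hm : mn < 2 ^ bn) :
    pvCut l (mn + 2 ^ bn) = pvCut l mn
      + ((∑ j ∈ Finset.range (pvK l), pvW l bn j) - pvW l bn bn)
      - 2 * ∑ j ∈ Finset.range (pvK l), (if mn.testBit j then pvW l bn j else 0) := by
  have hbmem : bn ∈ Finset.range (pvK l) := Finset.mem_range.mpr hb
  have htbn : mn.testBit bn = false := Nat.testBit_lt_two_pow hm
  have ht' : ∀ i : Nat, (mn + 2 ^ bn).testBit i = (if i = bn then true else mn.testBit i) :=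
    fun i => testBit_add_pow mn bn i hm
  set s' : Finset Nat := (Finset.range (pvK l)).erase bn with hs'
  have hmem' : ∀ i ∈ s', i ≠ bn := fun i hi => Finset.ne_of_mem_erase hi
  have hsum : ∀ (F : Nat → Int), (∑ j ∈ Finset.range (pvK l), F j) = (∑ j ∈ s', F j) + F bn :=
    fun F => (Finset.sum_erase_add _ F hbmem).symm
  have hcut' : pvCut l (mn + 2 ^ bn)
      = (∑ i ∈ s', ∑ j ∈ s', if mn.testBit i ∧ ¬ mn.testBit j then pvW l i j else 0)
        + ∑ j ∈ s', (if ¬ mn.testBit j then pvW l bn j else 0) := by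
    unfold pvCut
    rw [hsum]
    congr 1
    · refine Finset.sum_congr rfl ?_
      intro i hi
      rw [hsum]
      have h1 : (if (mn + 2 ^ bn).testBit i ∧ ¬ (mn + 2 ^ bn).testBit bn then pvW l i bn else 0)
          = 0 := by
        rw [ht' bn, if_pos rfl]
        simp
      rw [h1, add_zero]
      refine Finset.sum_congr rfl ?_
      intro j hj
      rw [ht' i, ht' j, if_neg (hmem' i hi), if_neg (hmem' j hj)]
    · rw [hsum]
      have h1 : (if (mn + 2 ^ bn).testBit bn ∧ ¬ (mn + 2 ^ bn).testBit bn then pvW l bn bn else 0)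
          = 0 := by simp
      rw [h1, add_zero]
      refine Finset.sum_congr rfl ?_
      intro j hj
      rw [ht' bn, ht' j, if_pos rfl, if_neg (hmem' j hj)]
      simp
  have hcut : pvCut l mn
      = (∑ i ∈ s', ∑ j ∈ s', if mn.testBit i ∧ ¬ mn.testBit j then pvW l i j else 0)
        + ∑ i ∈ s', (if mn.testBit i then pvW l bn i else 0) := by
    unfold pvCut
    rw [hsum]
    have h0 : (∑ j ∈ Finset.range (pvK l),
        if mn.testBit bn ∧ ¬ mn.testBit j then pvW l bn j else 0) = 0 := by
      refine Finset.sum_eq_zero ?_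
      intro j _
      rw [htbn]
      simp
    rw [h0, add_zero]
    rw [← Finset.sum_add_distrib]
    refine Finset.sum_congr rfl ?_
    intro i hi
    rw [hsum]
    congr 1
    rw [htbn, pvW_symm l bn i]
    by_cases hti : mn.testBit i <;> simp [hti]
  have hrow : (∑ j ∈ Finset.range (pvK l), pvW l bn j) - pvW l bn bn
      = ∑ j ∈ s', pvW l bn j := by
    rw [hsum]
    ring
  have hcross : (∑ j ∈ Finset.range (pvK l), (if mn.testBit j then pvW l bn j else 0))
      = ∑ j ∈ s', (if mn.testBit j then pvW l bn j else 0) := by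
    rw [hsum, htbn]
    simp
  have hsplit : (∑ j ∈ s', (if ¬ mn.testBit j then pvW l bn j else 0))
      = (∑ j ∈ s', pvW l bn j) - ∑ j ∈ s', (if mn.testBit j then pvW l bn j else 0) := by
    rw [← Finset.sum_sub_distrib]
    refine Finset.sum_congr rfl ?_
    intro j _
    by_cases htj : mn.testBit j <;> simp [htj]
  rw [hcut', hcut, hrow, hcross, hsplit]
  ring

-- ---- the argmax fold over masks ----
def pvBestF (l : List Char) : (Int × Int) → Nat → (Int × Int) := fun st m =>
  if pvCut l m > st.2 then ((m : Int), pvCut l m) else st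

def pvBest (l : List Char) (N : Nat) : Int × Int :=
  (List.range (N + 1)).foldl (pvBestF l) (0, -1)

lemma pvCut_zero (l : List Char) : pvCut l 0 = 0 := by
  unfold pvCut
  refine Finset.sum_eq_zero fun i _ => Finset.sum_eq_zero fun j _ => ?_
  simp [Nat.zero_testBit]

lemma pvBest_succ (l : List Char) (N : Nat) :
    pvBest l (N + 1) = pvBestF l (pvBest l N) (N + 1) := by
  unfold pvBest
  rw [List.range_succ, List.foldl_append]
  rfl

lemma pvBest_zero (l : List Char) : pvBest l 0 = (0, 0) := by
  unfold pvBest pvBestF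
  simp [pvCut_zero]

lemma pvBest_mask_nat (l : List Char) (N : Nat) :
    ∃ bm : Nat, bm ≤ N ∧ (pvBest l N).1 = (bm : Int) := by
  induction N with
  | zero => exact ⟨0, le_refl 0, by rw [pvBest_zero]; rfl⟩
  | succ N ih =>
    obtain ⟨bm, hle, hbm⟩ := ih
    rw [pvBest_succ]
    unfold pvBestF
    by_cases hc : pvCut l (N + 1) > (pvBest l N).2
    · exact ⟨N + 1, le_refl _, by rw [if_pos hc]⟩
    · exact ⟨bm, by omega, by rw [if_neg hc]; exact hbm⟩

lemma dpLoop (l : List Char) (g : List (List Int)) (srow : List Int)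
    (hsq : pvSq g (pvK l)) (hg : ∀ i j : Nat, pvE g i j = pvW l i j)
    (hsrow : srow = (PySem.List.pyRange 0 ((pvK l : Nat) : Int) 1).map (fun b =>
      (PySem.List.pyGetD g b []).sum - PySem.List.pyGetD (PySem.List.pyGetD g b []) b 0))
    (N : Nat) (hN : N ≤ 2 ^ (pvK l) - 1) :
    (((PySem.List.pyRange 1 (1 + (N : Nat)) 1).foldl (bMaskStep (pvK l) g srow)
        (List.replicate (2 ^ (pvK l)) (0 : Int), 0, 0)).1.length = 2 ^ (pvK l)) ∧
    (∀ m : Nat, m ≤ N →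
      ((PySem.List.pyRange 1 (1 + (N : Nat)) 1).foldl (bMaskStep (pvK l) g srow)
        (List.replicate (2 ^ (pvK l)) (0 : Int), 0, 0)).1.getD m 0 = pvCut l m) ∧
    (((PySem.List.pyRange 1 (1 + (N : Nat)) 1).foldl (bMaskStep (pvK l) g srow)
        (List.replicate (2 ^ (pvK l)) (0 : Int), 0, 0)).2.1 = (pvBest l N).2) ∧
    (((PySem.List.pyRange 1 (1 + (N : Nat)) 1).foldl (bMaskStep (pvK l) g srow)
        (List.replicate (2 ^ (pvK l)) (0 : Int), 0, 0)).2.2 = (pvBest l N).1) := by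
  induction N with
  | zero =>
    rw [show ((1 : Int) + (0 : Nat)) = 1 by norm_num, PySem.List.pyRange_one_eq_nil (by norm_num)]
    simp only [List.foldl_nil]
    refine ⟨by simp, ?_, by rw [pvBest_zero], by rw [pvBest_zero]⟩
    intro m hm
    interval_cases m
    rw [pvCut_zero, List.getD_eq_getElem?_getD, List.getElem?_replicate,
      if_pos (by positivity)]
    rfl
  | succ N ih =>
    have hN' : N ≤ 2 ^ pvK l - 1 := by omega
    obtain ⟨hlen, hsc, hb1, hb2⟩ := ih hN'
    have hk1 : 1 ≤ 2 ^ pvK l := Nat.one_le_two_pow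
    have hmask : (1 : Int) + ((N : Nat) : Int) = (((N + 1 : Nat) : Nat) : Int) := by
      push_cast
      ring
    have hsplit : PySem.List.pyRange 1 (1 + ((N + 1 : Nat) : Int)) 1
        = PySem.List.pyRange 1 (1 + ((N : Nat) : Int)) 1 ++ [1 + ((N : Nat) : Int)] := by
      have h1 : (1 : Int) + ((N + 1 : Nat) : Int) = (1 + ((N : Nat) : Int)) + 1 := by
        push_cast
        ring
      rw [h1, PySem.List.pyRange_one_succ_right (by push_cast; omega)]
    rw [hsplit, List.foldl_append, List.foldl_cons, List.foldl_nil]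
    have hL2 : N + 1 < 2 ^ PySem.Int.bitLength (((N + 1 : Nat) : Nat) : Int) := by
      have h := PySem.Int.lt_two_pow_bitLength (((N + 1 : Nat) : Nat) : Int)
      simpa using h
    have hL1 : 2 ^ (PySem.Int.bitLength (((N + 1 : Nat) : Nat) : Int) - 1) ≤ N + 1 := by
      have h := PySem.Int.two_pow_bitLength_le (((N + 1 : Nat) : Nat) : Int)
        (by exact_mod_cast Nat.succ_ne_zero N)
      simpa using h
    have hLpos : 1 ≤ PySem.Int.bitLength (((N + 1 : Nat) : Nat) : Int) := by
      rcases Nat.eq_zero_or_pos (PySem.Int.bitLength (((N + 1 : Nat) : Nat) : Int)) with h0 | h0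
      · rw [h0] at hL2
        simp at hL2
      · omega
    set bn : Nat := PySem.Int.bitLength (((N + 1 : Nat) : Nat) : Int) - 1 with hbn
    have hb_int : ((PySem.Int.bitLength (((N + 1 : Nat) : Nat) : Int) : Nat) : Int) - 1
        = ((bn : Nat) : Int) := by
      rw [hbn, Nat.cast_sub hLpos]
      norm_num
    have hpow : 2 ^ bn ≤ N + 1 := hL1
    have hlt2 : N + 1 < 2 ^ (bn + 1) := by
      rw [hbn, Nat.sub_add_cancel hLpos]
      exact hL2
    have hbnk : bn < pvK l := by
      by_contra hcon
      push_neg at hcon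
      have : 2 ^ pvK l ≤ 2 ^ bn := Nat.pow_le_pow_right (by norm_num) hcon
      omega
    set mn : Nat := N + 1 - 2 ^ bn with hmn
    have hmnlt : mn < 2 ^ bn := by
      have : (2:Nat) ^ (bn + 1) = 2 ^ bn + 2 ^ bn := by ring
      omega
    have hmnsum : mn + 2 ^ bn = N + 1 := by omega
    have hmnN : mn ≤ N := by
      have : 1 ≤ 2 ^ bn := Nat.one_le_two_pow
      omega
    set ST := (PySem.List.pyRange 1 (1 + ((N : Nat) : Int)) 1).foldl
      (bMaskStep (pvK l) g srow) (List.replicate (2 ^ pvK l) (0 : Int), 0, 0) with hST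
    have hbn_len : bn < g.length := by
      rw [hsq.1]
      omega
    have hrowg : g.getD bn [] = g[bn]'hbn_len := List.getD_eq_getElem _ _ hbn_len
    have hrowlen : (g.getD bn []).length = pvK l := by
      rw [hrowg]
      exact hsq.2 _ (List.getElem_mem _)
    have hrowsum : (g.getD bn []).sum = ∑ j ∈ Finset.range (pvK l), pvW l bn j := by
      rw [sum_eq_sum_getD, hrowlen]
      exact Finset.sum_congr rfl fun j _ => hg bn j
    have hstep : bMaskStep (pvK l) g srow ST (1 + ((N : Nat) : Int)) =
        (PySem.List.pySetD ST.1 (((N + 1 : Nat) : Nat) : Int) (pvCut l (N + 1)),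
         (if pvCut l (N + 1) > (pvBest l N).2 then pvCut l (N + 1) else (pvBest l N).2),
         (if pvCut l (N + 1) > (pvBest l N).2 then (((N + 1 : Nat) : Nat) : Int)
          else (pvBest l N).1)) := by
      unfold bMaskStep
      rw [hmask, hb_int]
      simp only [Int.toNat_natCast, Nat.one_shiftLeft]
      rw [show (((N + 1 : Nat) : Nat) : Int) - ((2 ^ bn : Nat) : Int) = ((mn : Nat) : Int) by
        rw [hmn, Nat.cast_sub hpow]]
      rw [crossScan g ((bn : Nat) : Int) mn (pvK l)]
      rw [hsrow, PySem.List.pyGetD_map_pyRange _ (pvK l) bn _ hbnk]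
      simp only [PySem.List.pyGetD_natCast]
      have hcross : (∑ j ∈ Finset.range (pvK l),
          if mn.testBit j then (g.getD bn []).getD j 0 else 0)
          = ∑ j ∈ Finset.range (pvK l), (if mn.testBit j then pvW l bn j else 0) := by
        refine Finset.sum_congr rfl fun j _ => ?_
        rw [show (g.getD bn []).getD j 0 = pvE g bn j from rfl, hg bn j]
      rw [hcross, hrowsum]
      rw [show (g.getD bn []).getD bn 0 = pvE g bn bn from rfl, hg bn bn]
      rw [hsc mn hmnN]
      have hval : pvCut l mn + ((∑ j ∈ Finset.range (pvK l), pvW l bn j) - pvW l bn bn)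
          - 2 * (∑ j ∈ Finset.range (pvK l), (if mn.testBit j then pvW l bn j else 0))
          = pvCut l (N + 1) := by
        rw [← hmnsum, cut_step l bn mn hbnk hmnlt]
      rw [hval, hb1, hb2]
      split_ifs <;> rfl
    rw [hstep]
    refine ⟨?_, ?_, ?_, ?_⟩
    · rw [PySem.List.length_pySetD]
      exact hlen
    · intro m hm
      rw [PySem.List.pySetD_natCast]
      by_cases hmN : m = N + 1
      · subst hmN
        rw [List.getD_eq_getElem?_getD, List.getElem?_set_self (by rw [hlen]; omega),
          Option.getD_some]
      · rw [List.getD_eq_getElem?_getD, List.getElem?_set_ne (by omega),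
          ← List.getD_eq_getElem?_getD]
        exact hsc m (by omega)
    · by_cases hc : pvCut l (N + 1) > (pvBest l N).2 <;>
        simp [pvBest_succ, pvBestF, hc]
    · by_cases hc : pvCut l (N + 1) > (pvBest l N).2 <;>
        simp [pvBest_succ, pvBestF, hc]

lemma pyRangePow (K : Nat) :
    PySem.List.pyRange 0 ((2 : Int) ^ K) 1 = (List.range (2 ^ K)).map (fun m => ((m : Nat) : Int)) := by
  have h : ((2 : Int) ^ K) = ((2 ^ K : Nat) : Int) := by push_cast; ring
  rw [h, PySem.List.pyRange_one]
  simp only [Int.sub_zero, Int.toNat_natCast, zero_add]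

-- A's whole mask loop computes pvBest
lemma aMaskLoop (l : List Char) (freq : List (List Int))
    (hfreq : ∀ i j : Nat, pvE freq i j = pvCnt l i j)
    (hp : ∀ p ∈ pvP l, pvRk l p.1 < 19 ∧ pvRk l p.2 < 19) :
    (PySem.List.pyRange 0 ((2 : Int) ^ pvK l) 1).foldl (fun (st : Int × Int) mask =>
      if (PySem.List.pyRange 0 19 1).foldl (fun acc i =>
          (PySem.List.pyRange 0 19 1).foldl (fun acc j =>
            if PySem.Int.band (mask >>> i.toNat) 1 != PySem.Int.band (mask >>> j.toNat) 1 then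
              acc + PySem.List.pyGetD (PySem.List.pyGetD freq i []) j 0
            else acc) acc) 0 > st.2 then
        (mask, (PySem.List.pyRange 0 19 1).foldl (fun acc i =>
          (PySem.List.pyRange 0 19 1).foldl (fun acc j =>
            if PySem.Int.band (mask >>> i.toNat) 1 != PySem.Int.band (mask >>> j.toNat) 1 then
              acc + PySem.List.pyGetD (PySem.List.pyGetD freq i []) j 0
            else acc) acc) 0)
      else st) (0, -1)
    = pvBest l (2 ^ pvK l - 1) := by
  rw [pyRangePow]
  rw [List.foldl_map]
  have hscore : ∀ m : Nat, (PySem.List.pyRange 0 19 1).foldl (fun acc i =>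
      (PySem.List.pyRange 0 19 1).foldl (fun acc j =>
        if PySem.Int.band (((m : Nat) : Int) >>> i.toNat) 1 !=
            PySem.Int.band (((m : Nat) : Int) >>> j.toNat) 1 then
          acc + PySem.List.pyGetD (PySem.List.pyGetD freq i []) j 0
        else acc) acc) 0 = pvCut l m := by
    intro m
    rw [doubleScan freq m]
    have hcongr : (∑ i ∈ Finset.range 19, ∑ j ∈ Finset.range 19,
        if m.testBit i ≠ m.testBit j then pvE freq i j else 0)
        = ∑ i ∈ Finset.range 19, ∑ j ∈ Finset.range 19,
          if m.testBit i ≠ m.testBit j then pvCnt l i j else 0 := by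
      refine Finset.sum_congr rfl fun i _ => Finset.sum_congr rfl fun j _ => ?_
      rw [hfreq i j]
    rw [hcongr, cutA_eq_pvCut l hp m]
  have hstep : ∀ (st : Int × Int) (m : Nat), m ∈ List.range (2 ^ pvK l) →
      (fun (st : Int × Int) (m : Nat) =>
        if (PySem.List.pyRange 0 19 1).foldl (fun acc i =>
            (PySem.List.pyRange 0 19 1).foldl (fun acc j =>
              if PySem.Int.band (((m : Nat) : Int) >>> i.toNat) 1 !=
                  PySem.Int.band (((m : Nat) : Int) >>> j.toNat) 1 then
                acc + PySem.List.pyGetD (PySem.List.pyGetD freq i []) j 0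
              else acc) acc) 0 > st.2 then
          (((m : Nat) : Int), (PySem.List.pyRange 0 19 1).foldl (fun acc i =>
            (PySem.List.pyRange 0 19 1).foldl (fun acc j =>
              if PySem.Int.band (((m : Nat) : Int) >>> i.toNat) 1 !=
                  PySem.Int.band (((m : Nat) : Int) >>> j.toNat) 1 then
                acc + PySem.List.pyGetD (PySem.List.pyGetD freq i []) j 0
              else acc) acc) 0)
        else st) st m = pvBestF l st m := by
    intro st m _
    simp only [hscore m]
    rfl
  rw [PySem.List.foldl_congr_mem _ _ (pvBestF l) _ hstep]
  unfold pvBest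
  rw [Nat.sub_add_cancel Nat.one_le_two_pow]

-- ---- the common output ----
def pvBM (l : List Char) : Nat := ((pvBest l (2 ^ pvK l - 1)).1).toNat

lemma pvBM_cast (l : List Char) : ((pvBM l : Nat) : Int) = (pvBest l (2 ^ pvK l - 1)).1 := by
  obtain ⟨bm, _, hbm⟩ := pvBest_mask_nat l (2 ^ pvK l - 1)
  unfold pvBM
  rw [hbm]
  simp

def pvOut (l : List Char) : List Char :=
  l.map (fun c =>
    if kiemTraNguyenAm c = false ∧ (pvBM l).testBit (pvRk l c) then PySem.Chars.upperChar c
    else c)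

lemma intCast_shift_band_nat (m i : Nat) :
    PySem.Int.band ((m : Int) >>> (i : Nat)) 1 = if m.testBit i then 1 else 0 := by
  rw [← Int.natCast_shiftRight, show (1 : Int) = ((1 : Nat) : Int) from rfl,
    PySem.Int.band_natCast]
  rw [Nat.and_one_is_mod, Nat.testBit]
  rcases Nat.mod_two_eq_zero_or_one (m >>> i) with hb | hb <;> simp [hb]

lemma dom_chars (s : String) (hdom : Dom_consonant s) : ∀ c ∈ s.toList, c.toNat < 256 := by
  intro c hc
  have h : pvDomChar c = true := by
    have := hdom
    unfold Dom_consonant pvDomStr at this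
    rw [List.all_eq_true] at this
    exact this c hc
  unfold pvDomChar at h
  simp only [Bool.or_eq_true, Bool.and_eq_true, decide_eq_true_eq, beq_iff_eq] at h
  omega

-- ---- port A computes the common output ----
lemma portA_eq (s : String) (hdom : Dom_consonant s) (hpre : Pre_consonant s) :
    consonant s = String.ofList (pvOut s.toList) := by
  have hdom' : ∀ c ∈ s.toList, c.toNat < 256 := dom_chars s hdom
  have hp : ∀ p ∈ pvP s.toList, pvRk s.toList p.1 < 19 ∧ pvRk s.toList p.2 < 19 :=
    (pre_iff s).mp hpre
  obtain ⟨hlen, hidx, hent⟩ := aFold_pvD s.toList hdom'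
  have h0 : consonant s = String.ofList (s.toList.map (fun c =>
      if kiemTraNguyenAm c == false then
        if PySem.Int.band
            (((PySem.List.pyRange 0
                ((2 : Int) ^ ((s.toList.foldl aStep (List.replicate 256 (-1 : Int), 0)).2).toNat) 1).foldl
              (aMaskStep ((s.toList.zip s.toList.tail).foldl
                (aPairStep (s.toList.foldl aStep (List.replicate 256 (-1 : Int), 0)).1)
                (List.replicate 19 (List.replicate 19 (0 : Int))))) (0, -1)).1 >>>
              (PySem.List.pyGetD (s.toList.foldl aStep (List.replicate 256 (-1 : Int), 0)).1
                (c.toNat : Int) (-1)).toNat) 1 == 1 then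
          PySem.Chars.upperChar c
        else c
      else c)) := rfl
  rw [h0]
  have hidx3 : ((s.toList.foldl aStep (List.replicate 256 (-1 : Int), 0)).2).toNat = pvK s.toList := by
    rw [hidx]
    exact Int.toNat_natCast _
  have hfr : ∀ i j : Nat, pvE ((s.toList.zip s.toList.tail).foldl
      (aPairStep (s.toList.foldl aStep (List.replicate 256 (-1 : Int), 0)).1)
      (List.replicate 19 (List.replicate 19 (0 : Int)))) i j = pvCnt s.toList i j :=
    fun i j => aFreq_spec s.toList hdom' hp i j
  have hresv : ((PySem.List.pyRange 0
      ((2 : Int) ^ ((s.toList.foldl aStep (List.replicate 256 (-1 : Int), 0)).2).toNat) 1).foldl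
      (aMaskStep ((s.toList.zip s.toList.tail).foldl
        (aPairStep (s.toList.foldl aStep (List.replicate 256 (-1 : Int), 0)).1)
        (List.replicate 19 (List.replicate 19 (0 : Int))))) (0, -1))
      = pvBest s.toList (2 ^ pvK s.toList - 1) := by
    rw [hidx3]
    exact aMaskLoop s.toList _ hfr hp
  rw [hresv]
  unfold pvOut
  refine congrArg String.ofList (List.map_congr_left ?_)
  intro c hc
  by_cases hv : kiemTraNguyenAm c = false
  · have hcD : c ∈ pvD s.toList := (pvD_mem _ c).mpr ⟨hv, hc⟩
    rw [aLookup s.toList c hcD hdom']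
    rw [← pvBM_cast s.toList, Int.toNat_natCast, intCast_shift_band_nat, beq_ite_bits]
    by_cases hb : (pvBM s.toList).testBit (pvRk s.toList c) <;> simp [hb, hv]
  · have hv' : kiemTraNguyenAm c = true := by simpa using hv
    simp [hv']

-- ---- port B computes the common output ----
lemma portB_eq (s : String) :
    consonant_alt s = String.ofList (pvOut s.toList) := by
  obtain ⟨hszB, hentB⟩ := bFold_pvD s.toList
  have h0 : consonant_alt s = String.ofList (s.toList.map (fun c =>
      if (s.toList.foldl bStep PySem.Dict.empty).contains c &&
          PySem.Int.band
            (((PySem.List.pyRange 1 ((2 : Int) ^ (s.toList.foldl bStep PySem.Dict.empty).size) 1).foldl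
                (bMaskStep (s.toList.foldl bStep PySem.Dict.empty).size
                  ((s.toList.zip s.toList.tail).foldl
                    (bPairStep (s.toList.foldl bStep PySem.Dict.empty))
                    (List.replicate (s.toList.foldl bStep PySem.Dict.empty).size
                      (List.replicate (s.toList.foldl bStep PySem.Dict.empty).size (0 : Int))))
                  ((PySem.List.pyRange 0 ((s.toList.foldl bStep PySem.Dict.empty).size : Int) 1).map
                    (fun b =>
                      (PySem.List.pyGetD
                        ((s.toList.zip s.toList.tail).foldl
                          (bPairStep (s.toList.foldl bStep PySem.Dict.empty))
                          (List.replicate (s.toList.foldl bStep PySem.Dict.empty).size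
                            (List.replicate (s.toList.foldl bStep PySem.Dict.empty).size (0 : Int)))) b []).sum -
                      PySem.List.pyGetD
                        (PySem.List.pyGetD
                          ((s.toList.zip s.toList.tail).foldl
                            (bPairStep (s.toList.foldl bStep PySem.Dict.empty))
                            (List.replicate (s.toList.foldl bStep PySem.Dict.empty).size
                              (List.replicate (s.toList.foldl bStep PySem.Dict.empty).size (0 : Int)))) b []) b 0)))
                (List.replicate (2 ^ (s.toList.foldl bStep PySem.Dict.empty).size) (0 : Int), 0, 0)).2.2 >>>
              ((s.toList.foldl bStep PySem.Dict.empty).getD c 0).toNat) 1 == 1 then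
        PySem.Chars.upperChar c
      else c)) := rfl
  rw [h0]
  have hsz : (s.toList.foldl bStep PySem.Dict.empty).size = pvK s.toList := hszB
  rw [hsz]
  obtain ⟨hsq, hgw⟩ := bG_spec s.toList
  rw [hsz] at hsq hgw
  have h1 : (1 : Nat) ≤ 2 ^ pvK s.toList := Nat.one_le_two_pow
  have hbnd : ((2 : Int) ^ pvK s.toList) = 1 + ((2 ^ pvK s.toList - 1 : Nat) : Int) := by
    have h2 : ((2 : Int) ^ pvK s.toList) = ((2 ^ pvK s.toList : Nat) : Int) := by
      push_cast
      ring
    rw [h2]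
    omega
  rw [hbnd]
  obtain ⟨_hl, _hs, _hb1, hb22⟩ := dpLoop s.toList
    ((s.toList.zip s.toList.tail).foldl (bPairStep (s.toList.foldl bStep PySem.Dict.empty))
      (List.replicate (pvK s.toList) (List.replicate (pvK s.toList) (0 : Int))))
    ((PySem.List.pyRange 0 ((pvK s.toList : Nat) : Int) 1).map (fun b =>
      (PySem.List.pyGetD
        ((s.toList.zip s.toList.tail).foldl (bPairStep (s.toList.foldl bStep PySem.Dict.empty))
          (List.replicate (pvK s.toList) (List.replicate (pvK s.toList) (0 : Int)))) b []).sum -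
      PySem.List.pyGetD
        (PySem.List.pyGetD
          ((s.toList.zip s.toList.tail).foldl (bPairStep (s.toList.foldl bStep PySem.Dict.empty))
            (List.replicate (pvK s.toList) (List.replicate (pvK s.toList) (0 : Int)))) b []) b 0))
    hsq hgw rfl (2 ^ pvK s.toList - 1) (le_refl _)
  rw [hb22, ← pvBM_cast]
  unfold pvOut
  refine congrArg String.ofList (List.map_congr_left ?_)
  intro c hc
  have hcont : (s.toList.foldl bStep PySem.Dict.empty).contains c = (pvD s.toList).contains c := by
    rw [PySem.Dict.contains_eq_isSome_get?, hentB c]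
    by_cases hm : c ∈ pvD s.toList <;> simp [hm]
  by_cases hv : kiemTraNguyenAm c = false
  · have hcD : c ∈ pvD s.toList := (pvD_mem _ c).mpr ⟨hv, hc⟩
    rw [hcont, bLookup s.toList c hcD, Int.toNat_natCast, intCast_shift_band_nat, beq_ite_bits]
    have hcontT : (pvD s.toList).contains c = true := by simpa using hcD
    rw [hcontT]
    by_cases hb : (pvBM s.toList).testBit (pvRk s.toList c) <;> simp [hb, hv]
  · have hcD : c ∉ pvD s.toList := fun hmem => hv ((pvD_mem _ c).mp hmem).1
    have hcontF : (pvD s.toList).contains c = false := by simpa using hcD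
    rw [hcont, hcontF]
    have hv' : kiemTraNguyenAm c = true := by simpa using hv
    simp [hv']

-- ===== VERDICT (by name: the statement is the Claim_ definition above) =====
theorem consonant_spec : Claim_equal_consonant := by
  intro s hdom hpre
  unfold Spec_consonant
  rw [portA_eq s hdom hpre, portB_eq s]
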